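-- pv_equiv track=rewrite | github.com/Choi-YoungUn/TIL | SWEA/swea_1215.py | check
-- ===== SOURCE A (Python) =====
-- def check(num, lists):
--     count = 0
--     if not(num % 2):  #길이가 짝수일때
--
--             #가로줄 검사
--         for y in range(8):  #세로축
--             for x in range(8 - num +1):   #가로축
--                 for rang in range(num // 2):
--                     if lists[y][x + rang] == lists[y][x + num - 1 - rang]:#각 대응 자리 비교
--                         pass
--                     else:
--                         break #틀리다면 끝낸다
--                 else:
--                     count += 1
--         for y in range(8 - num +1):  #세로축
--             for x in range(8):   #가로축
--                 for rang in range(num // 2):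
--                     if lists[y + rang][x] == lists[y+ num - 1 - rang][x ]:#각 대응 자리 비교
--                         pass
--                     else:
--                         break   #틀리다면 끝낸다
--                 else:
--                     count += 1
--         return count
--     else:  #길이가 홀수일때
--               #세로줄 검사
--         for y in range(8):  #세로축
--             for x in range(8 - num +1):   #가로축
--                 for rang in range(num // 2):
--                     if lists[y][x + rang] == lists[y][x + num - 1 - rang]:#각 대응 자리 비교
--                         pass
--                     else:
--                         break    #틀리다면 끝낸다
--                 else:
--                     count += 1
--         for y in range(8 - num +1):  #세로축
--             for x in range(8):   #가로축
--                 for rang in range(num // 2):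
--                     if lists[y + rang][x] == lists[y+ num - 1 - rang][x ]:#각 대응 자리 비교
--                         pass
--                     else:
--                         break    #틀리다면 끝낸다
--                 else:
--                     count += 1
--         return count
-- ===== SOURCE B (Python) =====
-- def check(num, lists):
--     def line_count(get):
--         if num < 2:
--             return 9 - num  # every window shorter than 2 is a palindrome: one count per start
--         return sum(1 for s in range(8 - num + 1)
--                    if [get(s + i) for i in range(num)]
--                       == [get(s + i) for i in range(num)][::-1])
--     return sum(line_count(lambda i, y=y: lists[y][i]) for y in range(8)) + \
--            sum(line_count(lambda i, x=x: lists[i][x]) for x in range(8))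
-- ===== Notes on version B (the rewrite author's own statement) =====
-- stated objective: simpler
-- what changed: A's duplicated (character-identical) even/odd branches with a three-deep break-on-mismatch pair loop are collapsed into one window-count helper over abstract line accessors (8 rows and 8 columns treated symmetrically) that materializes each window and compares it with its reversal, short-circuiting windows shorter than 2.
import Mathlib
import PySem

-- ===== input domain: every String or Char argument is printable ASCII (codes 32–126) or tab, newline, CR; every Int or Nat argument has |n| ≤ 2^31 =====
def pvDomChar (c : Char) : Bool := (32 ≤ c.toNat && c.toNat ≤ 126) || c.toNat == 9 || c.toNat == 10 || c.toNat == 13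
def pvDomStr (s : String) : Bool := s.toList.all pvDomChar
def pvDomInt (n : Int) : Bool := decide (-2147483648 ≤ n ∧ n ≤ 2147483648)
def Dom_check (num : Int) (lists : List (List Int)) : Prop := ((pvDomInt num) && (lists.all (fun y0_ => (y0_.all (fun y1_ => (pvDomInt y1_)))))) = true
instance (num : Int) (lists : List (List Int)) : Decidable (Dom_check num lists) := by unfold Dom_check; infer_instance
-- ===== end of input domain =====

-- B collapses A's duplicated even/odd branches into one window-count helper over abstract
-- line accessors (the 8 rows and the 8 columns), comparing each materialized window with its
-- reversal (objective: simpler).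

-- ===== PORT A =====
-- The Python's even and odd branches are character-for-character identical; the port keeps
-- the `if` and both (identical) arms.
def check (num : Int) (lists : List (List Int)) : Int :=
  if PySem.Int.mod num 2 == 0 then
    let c1 :=
      (PySem.List.pyRange 0 8 1).foldl (fun count y =>
        (PySem.List.pyRange 0 (8 - num + 1) 1).foldl (fun count x =>
          if (PySem.List.pyRange 0 (PySem.Int.floordiv num 2) 1).all (fun rang =>
                PySem.List.pyGetD (PySem.List.pyGetD lists y []) (x + rang) 0
                  == PySem.List.pyGetD (PySem.List.pyGetD lists y []) (x + num - 1 - rang) 0)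
          then count + 1 else count) count) 0
    (PySem.List.pyRange 0 (8 - num + 1) 1).foldl (fun count y =>
      (PySem.List.pyRange 0 8 1).foldl (fun count x =>
        if (PySem.List.pyRange 0 (PySem.Int.floordiv num 2) 1).all (fun rang =>
              PySem.List.pyGetD (PySem.List.pyGetD lists (y + rang) []) x 0
                == PySem.List.pyGetD (PySem.List.pyGetD lists (y + num - 1 - rang) []) x 0)
        then count + 1 else count) count) c1
  else
    let c1 :=
      (PySem.List.pyRange 0 8 1).foldl (fun count y =>
        (PySem.List.pyRange 0 (8 - num + 1) 1).foldl (fun count x =>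
          if (PySem.List.pyRange 0 (PySem.Int.floordiv num 2) 1).all (fun rang =>
                PySem.List.pyGetD (PySem.List.pyGetD lists y []) (x + rang) 0
                  == PySem.List.pyGetD (PySem.List.pyGetD lists y []) (x + num - 1 - rang) 0)
          then count + 1 else count) count) 0
    (PySem.List.pyRange 0 (8 - num + 1) 1).foldl (fun count y =>
      (PySem.List.pyRange 0 8 1).foldl (fun count x =>
        if (PySem.List.pyRange 0 (PySem.Int.floordiv num 2) 1).all (fun rang =>
              PySem.List.pyGetD (PySem.List.pyGetD lists (y + rang) []) x 0
                == PySem.List.pyGetD (PySem.List.pyGetD lists (y + num - 1 - rang) []) x 0)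
        then count + 1 else count) count) c1

-- ===== PORT B =====
-- one helper for all 16 lines: `get` reads the line's i-th cell; the window
-- `[get(s+i) for i in range(num)]` is compared with its reversal ([::-1] is List.reverse);
-- windows shorter than 2 are palindromes without looking, one count per start
def lineCount (num : Int) (get : Int → Int) : Int :=
  if num < 2 then 9 - num
  else
    ((PySem.List.pyRange 0 (8 - num + 1) 1).countP (fun s =>
        (PySem.List.pyRange 0 num 1).map (fun i => get (s + i))
          == ((PySem.List.pyRange 0 num 1).map (fun i => get (s + i))).reverse) : Int)

def check_alt (num : Int) (lists : List (List Int)) : Int :=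
  ((PySem.List.pyRange 0 8 1).map (fun y =>
      lineCount num (fun i => PySem.List.pyGetD (PySem.List.pyGetD lists y []) i 0))).sum
    + ((PySem.List.pyRange 0 8 1).map (fun x =>
        lineCount num (fun i => PySem.List.pyGetD (PySem.List.pyGetD lists i []) x 0))).sum

-- ===== PRECONDITION & SPEC =====
-- Pre_ excludes grids without a full top-left 8x8 block when 2 ≤ num ≤ 8: on exactly those
-- inputs the Python A raises IndexError (for any other num its loops never index the grid).
def Pre_check (num : Int) (lists : List (List Int)) : Prop :=
  num ≤ 1 ∨ 8 < num ∨ (8 ≤ lists.length ∧ ∀ r ∈ lists.take 8, 8 ≤ r.length)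
instance (num : Int) (lists : List (List Int)) : Decidable (Pre_check num lists) := by unfold Pre_check; infer_instance

def pvWitness_check : Int × List (List Int) :=
  (3, [[1,2,1,0,0,1,2,3],[0,0,0,0,0,0,0,0],[1,1,2,2,3,3,4,4],[5,4,3,2,1,0,1,2],
       [7,7,7,7,7,7,7,7],[1,0,1,0,1,0,1,0],[2,3,4,5,6,7,8,9],[9,8,7,9,8,7,9,8]])

def Spec_check (num : Int) (lists : List (List Int)) (out : Int) : Prop := out = check_alt num lists
instance (num : Int) (lists : List (List Int)) (out : Int) : Decidable (Spec_check num lists out) := by unfold Spec_check; infer_instance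

-- ===== CLAIM (what is proved, stated in full; the proofs are below) =====
def Claim_equal_check : Prop := ∀ (num : Int) (lists : List (List Int)), Dom_check num lists → Pre_check num lists → Spec_check num lists (check num lists)

-- ===== LEMMAS AND PROOFS =====

-- a list equals its reverse iff the first half matches the mirrored second half
lemma pal_half (w : List Int) :
    (w = w.reverse) ↔ ∀ r < w.length / 2, w.getD r 0 = w.getD (w.length - 1 - r) 0 := by
  constructor
  · intro h r hr
    have hrlen : r < w.length := by omega
    have h2 : w.length - 1 - r < w.length := by omega
    have hg : w.getD r 0 = w.reverse.getD r 0 := by rw [← h]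
    rw [List.getD_eq_getElem w.reverse 0 (by simpa using hrlen), List.getElem_reverse] at hg
    rw [List.getD_eq_getElem _ _ hrlen, List.getD_eq_getElem _ _ h2]
    simpa [List.getElem?_eq_getElem hrlen] using hg
  · intro h
    apply List.ext_getElem (by simp)
    intro i h1 h2
    rw [List.getElem_reverse]
    rcases Nat.lt_or_ge i (w.length / 2) with hc | hc
    · have := h i hc
      rwa [List.getD_eq_getElem _ _ h1, List.getD_eq_getElem _ _ (by omega : w.length - 1 - i < w.length)] at this
    · rcases Nat.lt_or_ge (w.length - 1 - i) (w.length / 2) with hc2 | hc2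
      · have := h _ hc2
        rw [List.getD_eq_getElem _ _ (by omega : w.length - 1 - i < w.length),
            List.getD_eq_getElem _ _ (by omega : w.length - 1 - (w.length - 1 - i) < w.length)] at this
        have heq : w.length - 1 - (w.length - 1 - i) = i := by omega
        simp only [heq] at this
        exact this.symm
      · have heq : w.length - 1 - i = i := by omega
        simp only [heq]

-- B's materialize-and-reverse window test equals A's half pair-check, for any cell reader
lemma win_eq (f : Int → Int) (num s : Int) :
    ((PySem.List.pyRange 0 num 1).map (fun i => f (s + i))
       == ((PySem.List.pyRange 0 num 1).map (fun i => f (s + i))).reverse)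
    = (PySem.List.pyRange 0 (PySem.Int.floordiv num 2) 1).all (fun rang =>
        f (s + rang) == f (s + num - 1 - rang)) := by
  by_cases hn : num ≤ 0
  · have h1 : PySem.List.pyRange 0 num 1 = [] := by
      apply List.eq_nil_of_length_eq_zero
      rw [PySem.List.length_pyRange_one]; omega
    have h2 : PySem.List.pyRange 0 (PySem.Int.floordiv num 2) 1 = [] := by
      apply List.eq_nil_of_length_eq_zero
      rw [PySem.List.length_pyRange_one]
      rw [PySem.Int.floordiv_eq_ediv_of_pos (by norm_num)]; omega
    rw [h1, h2]; rfl
  · obtain ⟨m, rfl⟩ := Int.eq_ofNat_of_zero_le (by omega : (0:Int) ≤ num)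
    rw [PySem.List.pyRange_zero_natCast m, List.map_map]
    have hcomp : ((fun i => f (s + i)) ∘ fun k : Nat => (k : Int)) = fun k : Nat => f (s + (k : Int)) := rfl
    rw [hcomp]
    set w := (List.range m).map (fun k : Nat => f (s + (k : Int))) with hw
    have hwlen : w.length = m := by simp [hw]
    have hget : ∀ r, r < m → w.getD r 0 = f (s + (r : Int)) := by
      intro r hr
      rw [List.getD_eq_getElem w 0 (by omega)]
      simp [hw]
    have hfd : PySem.Int.floordiv (m : Int) 2 = ((m / 2 : Nat) : Int) := by
      exact_mod_cast PySem.Int.floordiv_natCast m 2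
    apply Bool.coe_iff_coe.mp
    simp only [beq_iff_eq, List.all_eq_true, PySem.List.mem_pyRange_one, hfd]
    rw [pal_half, hwlen]
    constructor
    · intro h rang hrang
      obtain ⟨r, rfl⟩ := Int.eq_ofNat_of_zero_le hrang.1
      have hr : r < m / 2 := by exact_mod_cast hrang.2
      have hpair := h r hr
      rw [hget r (by omega), hget (m - 1 - r) (by omega)] at hpair
      have e2 : s + (m : Int) - 1 - (r : Int) = s + ((m - 1 - r : Nat) : Int) := by omega
      rw [e2, hpair]
    · intro h r hr
      have hpair := h ((r : Nat) : Int) ⟨by positivity, by exact_mod_cast hr⟩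
      have e2 : s + (m : Int) - 1 - (r : Int) = s + ((m - 1 - r : Nat) : Int) := by omega
      rw [e2] at hpair
      rw [hget r (by omega), hget (m - 1 - r) (by omega)]
      exact hpair

-- B's guarded line count equals A's pair-test count over the same starts, for any cell reader
lemma line_eq (f : Int → Int) (num : Int) :
    lineCount num f
      = ((PySem.List.pyRange 0 (8 - num + 1) 1).countP (fun s =>
          (PySem.List.pyRange 0 (PySem.Int.floordiv num 2) 1).all (fun rang =>
            f (s + rang) == f (s + num - 1 - rang))) : Int) := by
  rw [lineCount]
  by_cases h2 : num < 2
  · rw [if_pos h2]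
    have hfd : PySem.List.pyRange 0 (PySem.Int.floordiv num 2) 1 = [] := by
      apply List.eq_nil_of_length_eq_zero
      rw [PySem.List.length_pyRange_one]
      rw [PySem.Int.floordiv_eq_ediv_of_pos (by norm_num)]; omega
    simp only [hfd, List.all_nil, List.countP_true, PySem.List.length_pyRange_one]
    omega
  · rw [if_neg h2]
    refine congrArg _ (List.countP_congr ?_)
    intro s _
    rw [(win_eq f num s : _ = _)]

-- ===== VERDICT (by name: the statement is the Claim_ definition above) =====
theorem check_spec : Claim_equal_check := by
  intro num lists _hdom _hpre
  unfold Spec_check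
  show check num lists = check_alt num lists
  rw [check, ite_self, check_alt]
  simp only [PySem.List.foldl_if_add_one, PySem.List.foldl_add, zero_add]
  refine congrArg₂ (· + ·) ?_ ?_
  · -- rows: same traversal order, pointwise-equal line counts
    refine congrArg List.sum (List.map_eq_map_iff.mpr ?_)
    intro y _
    exact (line_eq (fun i => PySem.List.pyGetD (PySem.List.pyGetD lists y []) i 0) num).symm
  · -- columns: rewrite B's line counts to A's pair-test counts, then swap the two sums
    have hpt : ∀ x ∈ PySem.List.pyRange 0 8 1,
        lineCount num (fun i => PySem.List.pyGetD (PySem.List.pyGetD lists i []) x 0)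
          = ((List.countP (fun y =>
              (PySem.List.pyRange 0 (PySem.Int.floordiv num 2)).all fun rang =>
                PySem.List.pyGetD (PySem.List.pyGetD lists (y + rang) []) x 0 ==
                  PySem.List.pyGetD (PySem.List.pyGetD lists (y + num - 1 - rang) []) x 0)
              (PySem.List.pyRange 0 (8 - num + 1)) : Nat) : Int) := by
      intro x _
      exact line_eq (fun t => PySem.List.pyGetD (PySem.List.pyGetD lists t []) x 0) num
    rw [List.map_congr_left hpt]
    -- Fubini over the concrete 8 columns
    simp only [← PySem.List.sum_map_ite_one_zero]
    rw [(by decide : PySem.List.pyRange 0 8 1 = [0,1,2,3,4,5,6,7])]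
    simp only [List.map_cons, List.map_nil, List.sum_cons, List.sum_nil, add_zero]
    simp only [PySem.List.sum_map_add_int]
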